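-- pv_equiv track=rewrite | github.com/FDlucifer/offensive-go-python-rust | leetcode-python-go/1796. 字符串中第二大的数字/main3.py | secondHighest
-- ===== SOURCE A (Python) =====
-- def secondHighest(s: str) -> int:
--     u1 = u2 = -1
--     for c in map(int, filter(str.isdigit, s)):
--         if u1 < c:
--             u1, u2 = c, u1
--         elif u1 != c and u2 < c:
--             u2 = c
--     return u2
-- ===== SOURCE B (Python) =====
-- def secondHighest(s: str) -> int:
--     ds = {int(c) for c in s if c.isdigit()}
--     xs = sorted(ds, reverse=True)
--     return xs[1] if len(xs) >= 2 else -1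
-- ===== Notes on version B (the rewrite author's own statement) =====
-- stated objective: simpler
-- what changed: Replaces the single-pass two-variable max/second-max state machine with collect-distinct-digits-into-a-set, sort descending, take the second element (or -1).
import Mathlib
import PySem

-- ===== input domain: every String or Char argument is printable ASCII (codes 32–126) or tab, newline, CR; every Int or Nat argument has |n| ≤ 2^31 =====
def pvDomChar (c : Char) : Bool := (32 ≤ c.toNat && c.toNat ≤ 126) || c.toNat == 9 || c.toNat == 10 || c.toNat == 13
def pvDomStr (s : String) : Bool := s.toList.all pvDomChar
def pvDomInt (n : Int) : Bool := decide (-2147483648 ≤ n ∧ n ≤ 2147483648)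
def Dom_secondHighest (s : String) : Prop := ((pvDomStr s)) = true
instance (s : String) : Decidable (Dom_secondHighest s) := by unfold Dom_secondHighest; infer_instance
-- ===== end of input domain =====

-- B replaces A's one-pass two-variable max/second-max state machine by collecting the set of
-- distinct digits, sorting it in descending order and taking the second element (objective: simpler).

-- ===== PORT A =====
-- int(c) on a single ASCII digit char is exactly (c.toNat - 48); PySem.Chars.isdigit admits only '0'..'9'
def secondHighest (s : String) : Int :=
  ((s.toList.filter (fun c => PySem.Chars.isdigit c)).map
      (fun c => ((c.toNat : Int) - 48))).foldl
    (fun (u : Int × Int) c =>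
      if u.1 < c then (c, u.1)
      else if u.1 ≠ c ∧ u.2 < c then (u.1, c)
      else u) (-1, -1) |>.2

-- ===== PORT B =====
def secondHighest_alt (s : String) : Int :=
  let ds := PySem.Set.ofList
    ((s.toList.filter (fun c => PySem.Chars.isdigit c)).map (fun c => ((c.toNat : Int) - 48)))
  let xs := PySem.List.sorted ds (fun x => x) true
  if 2 ≤ xs.length then PySem.List.pyGetD xs 1 (-1) else -1

-- ===== PRECONDITION & SPEC =====
def Spec_secondHighest (s : String) (out : Int) : Prop := out = secondHighest_alt s
instance (s : String) (out : Int) : Decidable (Spec_secondHighest s out) := by unfold Spec_secondHighest; infer_instance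

-- ===== CLAIM (what is proved, stated in full; the proofs are below) =====
def Claim_equal_secondHighest : Prop := ∀ (s : String), Dom_secondHighest s → Spec_secondHighest s (secondHighest s)

-- ===== LEMMAS AND PROOFS =====

-- the maximum of l (with -1 for empty) and the maximum of the elements strictly below it
def pvM (l : List Int) : Int := l.foldl max (-1)
def pvF2 (l : List Int) : Int := (l.filter (fun x => x < pvM l)).foldl max (-1)

lemma pv_foldl_max_mem (l : List Int) (a : Int) : l.foldl max a = a ∨ l.foldl max a ∈ l := by
  induction l generalizing a with
  | nil => exact Or.inl rfl
  | cons x t ih =>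
    rw [List.foldl_cons]
    rcases ih (max a x) with h | h
    · rcases max_choice a x with hm | hm
      · exact Or.inl (by rw [h, hm])
      · exact Or.inr (by rw [h, hm]; exact List.mem_cons_self)
    · exact Or.inr (List.mem_cons_of_mem _ h)

lemma pv_le_pvM (l : List Int) : ∀ x ∈ l, x ≤ pvM l := (PySem.List.le_foldl_max l (-1)).2

lemma pvM_cases (l : List Int) : pvM l = -1 ∨ pvM l ∈ l := pv_foldl_max_mem l (-1)

lemma pv_le_pvF2 (l : List Int) : ∀ x ∈ l.filter (fun x => x < pvM l), x ≤ pvF2 l :=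
  (PySem.List.le_foldl_max _ (-1)).2

lemma pvF2_cases (l : List Int) : pvF2 l = -1 ∨ pvF2 l ∈ l.filter (fun x => x < pvM l) :=
  pv_foldl_max_mem _ (-1)

-- A's loop computes (max of the digits seen, max of the digits strictly below that max)
lemma pv_foldA (l : List Int) :
    l.foldl (fun (u : Int × Int) c =>
      if u.1 < c then (c, u.1)
      else if u.1 ≠ c ∧ u.2 < c then (u.1, c)
      else u) (-1, -1) = (pvM l, pvF2 l) := by
  induction l using List.reverseRecOn with
  | nil => simp [pvM, pvF2]
  | append_singleton p c ih =>
    have hub := pv_le_pvM p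
    have hM : pvM (p ++ [c]) = max (pvM p) c := by
      simp [pvM, List.foldl_append]
    have hfil : (p ++ [c]).filter (fun x => x < pvM (p ++ [c])) =
        p.filter (fun x => x < pvM (p ++ [c])) ++ [c].filter (fun x => x < pvM (p ++ [c])) :=
      List.filter_append ..
    rw [List.foldl_append, ih, List.foldl_cons, List.foldl_nil]
    by_cases h1 : pvM p < c
    · have hMc : pvM (p ++ [c]) = c := by rw [hM]; exact max_eq_right h1.le
      have hfp : p.filter (fun x => x < pvM (p ++ [c])) = p :=
        List.filter_eq_self.2 (fun x hx => by
          simp only [hMc, decide_eq_true_eq]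
          exact lt_of_le_of_lt (hub x hx) h1)
      have hcnil : [c].filter (fun x => x < pvM (p ++ [c])) = [] := by simp [hMc]
      have hF : pvF2 (p ++ [c]) = pvM p := by
        unfold pvF2
        rw [hfil, hfp, hcnil, List.append_nil]
        rfl
      rw [if_pos h1, hMc, hF]
    · have hMc : pvM (p ++ [c]) = pvM p := by rw [hM]; exact max_eq_left (not_lt.1 h1)
      by_cases h2 : pvM p = c
      · have hcnil : [c].filter (fun x => x < pvM (p ++ [c])) = [] := by
          have hnc : ¬ (c < pvM (p ++ [c])) := by rw [hMc, h2]; exact lt_irrefl _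
          simp [hnc]
        have hF : pvF2 (p ++ [c]) = pvF2 p := by
          unfold pvF2
          rw [hfil, hcnil, List.append_nil, hMc]
        rw [if_neg h1, if_neg (by simp [h2]), hMc, hF]
      · have hlt : c < pvM p := lt_of_le_of_ne (not_lt.1 h1) (Ne.symm h2)
        have hcone : [c].filter (fun x => x < pvM (p ++ [c])) = [c] := by
          simp [hMc, hlt]
        have hF : pvF2 (p ++ [c]) = max (pvF2 p) c := by
          unfold pvF2
          rw [hfil, hcone, hMc, List.foldl_append, List.foldl_cons, List.foldl_nil]
        by_cases h3 : pvF2 p < c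
        · rw [if_neg h1, if_pos ⟨h2, h3⟩, hMc, hF, max_eq_right h3.le]
        · rw [if_neg h1, if_neg (by tauto), hMc, hF, max_eq_left (not_lt.1 h3)]

-- B's collect-sort-index computes the same value for any list of nonnegative ints
lemma pv_altSpec (l : List Int) (hpos : ∀ x ∈ l, 0 ≤ x) :
    (if 2 ≤ (PySem.List.sorted (PySem.Set.ofList l) (fun x => x) true).length
      then PySem.List.pyGetD (PySem.List.sorted (PySem.Set.ofList l) (fun x => x) true) 1 (-1)
      else -1) = pvF2 l := by
  set xs := PySem.List.sorted (PySem.Set.ofList l) (fun x => x) true with hxs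
  have hperm : xs.Perm (PySem.Set.ofList l) := PySem.List.sorted_perm _ _ _
  have hmem : ∀ y : Int, y ∈ xs ↔ y ∈ l := by
    intro y; rw [hperm.mem_iff, PySem.Set.mem_ofList]
  have hnodup : xs.Nodup := (hperm.nodup_iff).2 (PySem.Set.nodup_ofList l)
  have hsorted : List.Pairwise (fun a b : Int => b ≤ a) xs := by
    simpa using PySem.List.sorted_pairwise_rev (PySem.Set.ofList l) (fun x => x)
  have hstrict : List.Pairwise (fun a b : Int => b < a) xs :=
    (hsorted.and hnodup).imp (fun {a b} h => lt_of_le_of_ne h.1 (Ne.symm h.2))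
  match hx : xs with
  | [] =>
    have hl : l = [] := by
      apply List.eq_nil_iff_forall_not_mem.2
      intro x hxl
      simpa using (hmem x).2 hxl
    simp [hl, pvF2, pvM]
  | [a] =>
    have hall : ∀ x ∈ l, x = a := by
      intro x hxl
      simpa using (hmem x).2 hxl
    have hfil : l.filter (fun x => x < pvM l) = [] := by
      apply List.filter_eq_nil_iff.2
      intro x hxl
      simp only [decide_eq_true_eq, not_lt]
      rcases pvM_cases l with h | h
      · have := hpos x hxl; omega
      · rw [hall _ h, hall x hxl]
    simp [pvF2, hfil]
  | a :: b :: rest =>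
    have hlen : 2 ≤ (a :: b :: rest).length := by simp
    have hget : PySem.List.pyGetD (a :: b :: rest) 1 (-1) = b := by
      rw [PySem.List.pyGetD_ofNat' (a :: b :: rest) 1 (-1)]; rfl
    rw [if_pos hlen, hget]
    have hba : b < a := (List.pairwise_cons.1 hstrict).1 b (by simp)
    have hlea : ∀ y ∈ a :: b :: rest, y ≤ a := by
      intro y hy
      rcases List.mem_cons.1 hy with h | h
      · exact h.le
      · exact ((List.pairwise_cons.1 hstrict).1 y h).le
    have hleb : ∀ y ∈ b :: rest, y ≤ b := by
      intro y hy
      rcases List.mem_cons.1 hy with h | h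
      · exact h.le
      · exact ((List.pairwise_cons.1 (List.pairwise_cons.1 hstrict).2).1 y h).le
    have ha_mem : a ∈ l := (hmem a).1 (by simp)
    have hb_mem : b ∈ l := (hmem b).1 (by simp)
    have hMa : pvM l = a := by
      have h1 : a ≤ pvM l := pv_le_pvM l a ha_mem
      rcases pvM_cases l with h | h
      · have := hpos a ha_mem; omega
      · have h2 := hlea (pvM l) ((hmem _).2 h)
        omega
    have hbf : b ∈ l.filter (fun x => x < pvM l) :=
      List.mem_filter.2 ⟨hb_mem, by simp [hMa, hba]⟩
    have h1 : b ≤ pvF2 l := pv_le_pvF2 l b hbf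
    have h2 : pvF2 l ≤ b := by
      rcases pvF2_cases l with h | h
      · have := hpos b hb_mem; omega
      · have hmemf := List.mem_filter.1 h
        have hltF : pvF2 l < a := by
          have := hmemf.2; rw [hMa] at this; simpa using this
        have hxsf : pvF2 l ∈ a :: b :: rest := (hmem _).2 hmemf.1
        rcases List.mem_cons.1 hxsf with he | ht
        · omega
        · exact hleb _ ht
    omega

lemma pv_digits_nonneg (s : String) :
    ∀ x ∈ (s.toList.filter (fun c => PySem.Chars.isdigit c)).map
        (fun c => ((c.toNat : Int) - 48)), 0 ≤ x := by
  intro x hx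
  simp only [List.mem_map, List.mem_filter] at hx
  obtain ⟨c, ⟨_, hc⟩, rfl⟩ := hx
  simp only [PySem.Chars.isdigit, Bool.and_eq_true, decide_eq_true_eq] at hc
  have h1 := hc.1
  rw [Char.le_def, UInt32.le_iff_toNat_le] at h1
  have : (48 : Nat) ≤ c.toNat := h1
  omega

-- ===== VERDICT (by name: the statement is the Claim_ definition above) =====
theorem secondHighest_spec : Claim_equal_secondHighest := by
  intro s _
  unfold Spec_secondHighest secondHighest secondHighest_alt
  rw [pv_foldA]
  exact (pv_altSpec _ (pv_digits_nonneg s)).symm
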